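-- pv_equiv track=rewrite | github.com/farmilag/python | main.py | get_odd_count
-- ===== SOURCE A (Python) =====
-- def get_odd_count(count):
--     digits = list(map(int, str(count)))
--     res = 0
--     for i in digits:
--         if i == 0:
--             continue
--         elif i % 2 == 0:
--             res = res + 1
--         else:
--             continue
--
--     return res
-- ===== SOURCE B (Python) =====
-- def get_odd_count(count):
--     freq = {}
--     for d in map(int, str(count)):
--         freq[d] = freq.get(d, 0) + 1
--     return sum(freq.get(d, 0) for d in (2, 4, 6, 8))
-- ===== Notes on version B (the rewrite author's own statement) =====
-- stated objective: idiomatic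
-- what changed: Replaces the per-digit if/elif/continue branching loop with building a digit frequency table (histogram dict) and then summing the table's entries at the four fixed nonzero even digit keys.
import Mathlib
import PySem

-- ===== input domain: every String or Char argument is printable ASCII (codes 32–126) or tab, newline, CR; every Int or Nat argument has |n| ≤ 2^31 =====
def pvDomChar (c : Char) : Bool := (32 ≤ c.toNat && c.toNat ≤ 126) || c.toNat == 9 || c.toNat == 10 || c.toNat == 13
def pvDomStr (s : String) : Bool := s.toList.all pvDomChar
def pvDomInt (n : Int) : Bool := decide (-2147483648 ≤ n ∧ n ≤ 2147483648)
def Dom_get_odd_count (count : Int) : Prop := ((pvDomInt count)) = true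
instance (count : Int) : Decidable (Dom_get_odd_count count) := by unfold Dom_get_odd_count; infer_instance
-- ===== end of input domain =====

-- B replaces A's per-digit if/elif branch loop by a digit histogram summed at the four fixed nonzero even digit keys (idiomatic; same cost).

-- shared helper: list(map(int, str(count))) — the identical first line of both Pythons.
-- int(single char): (PySem.Int.ofChars? [c]).getD 0; ofChars? = none (Python ValueError, e.g. on '-'
-- for negative count) is excluded by Pre_get_odd_count, under which every char is a decimal digit.
def pvDigits (count : Int) : List Int :=
  (PySem.Int.toStr count).toList.map (fun c => (PySem.Int.ofChars? [c]).getD 0)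

-- ===== PORT A =====
def get_odd_count (count : Int) : Int :=
  (pvDigits count).foldl (fun res i =>
    if i = 0 then res
    else if PySem.Int.mod i 2 = 0 then res + 1
    else res) 0

-- ===== PORT B =====
def get_odd_count_alt (count : Int) : Int :=
  let freq := (pvDigits count).foldl (fun d x => d.insert x (d.getD x 0 + 1))
    (PySem.Dict.empty : PySem.Dict Int Int)
  (([2, 4, 6, 8] : List Int).map (fun d => freq.getD d 0)).sum

-- ===== PRECONDITION & SPEC =====
-- Pre_ excludes exactly the negative inputs, on which str(count) starts with '-' and
-- int('-') raises ValueError in A (and in B, which keeps the same map(int, str(count)) step).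
def Pre_get_odd_count (count : Int) : Prop := 0 ≤ count
instance (count : Int) : Decidable (Pre_get_odd_count count) := by unfold Pre_get_odd_count; infer_instance
def pvWitness_get_odd_count : Int := 2048

def Spec_get_odd_count (count : Int) (out : Int) : Prop := out = get_odd_count_alt count
instance (count : Int) (out : Int) : Decidable (Spec_get_odd_count count out) := by unfold Spec_get_odd_count; infer_instance

-- ===== CLAIM (what is proved, stated in full; the proofs are below) =====
def Claim_equal_get_odd_count : Prop := ∀ (count : Int), Dom_get_odd_count count → Pre_get_odd_count count → Spec_get_odd_count count (get_odd_count count)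

-- ===== LEMMAS AND PROOFS =====

-- every char produced by Nat.toDigits 10 is a decimal digit
theorem pv_toDigitsCore_digits (fuel n : Nat) (acc : List Char)
    (hacc : ∀ c ∈ acc, c ∈ ['0','1','2','3','4','5','6','7','8','9']) :
    ∀ c ∈ Nat.toDigitsCore 10 fuel n acc, c ∈ ['0','1','2','3','4','5','6','7','8','9'] := by
  induction fuel generalizing n acc with
  | zero => simpa [Nat.toDigitsCore] using hacc
  | succ f ih =>
    have hd : Nat.digitChar (n % 10) ∈ ['0','1','2','3','4','5','6','7','8','9'] := by
      have h10 : n % 10 < 10 := Nat.mod_lt _ (by omega)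
      generalize n % 10 = k at *
      interval_cases k <;> decide
    have hacc' : ∀ c ∈ Nat.digitChar (n % 10) :: acc, c ∈ ['0','1','2','3','4','5','6','7','8','9'] := by
      intro c hc
      rcases List.mem_cons.mp hc with rfl | hc
      · exact hd
      · exact hacc c hc
    intro c hc
    simp only [Nat.toDigitsCore] at hc
    split at hc
    · exact hacc' c hc
    · exact ih _ _ hacc' c hc

theorem pv_digits_bounded (count : Int) (h : 0 ≤ count) :
    ∀ i ∈ pvDigits count, 0 ≤ i ∧ i ≤ 9 := by
  intro i hi
  simp only [pvDigits, PySem.Int.toList_toStr, List.mem_map] at hi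
  obtain ⟨c, hc, rfl⟩ := hi
  have hc' : c ∈ ['0','1','2','3','4','5','6','7','8','9'] := by
    have : PySem.Int.toChars count = Nat.toDigits 10 count.toNat := by
      simp [PySem.Int.toChars, not_lt.mpr h]
    rw [this] at hc
    exact pv_toDigitsCore_digits _ _ [] (by simp) c hc
  fin_cases hc' <;> decide

-- A's loop counts the digits satisfying its branch condition
theorem pv_foldl_count (l : List Int) (acc : Int) :
    l.foldl (fun res i => if i = 0 then res else if PySem.Int.mod i 2 = 0 then res + 1 else res) acc
      = acc + (l.countP (fun i => !(i == 0) && (i % 2 == 0)) : Int) := by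
  simp only [PySem.Int.mod_eq_emod_of_pos (by norm_num : (0:Int) < 2)]
  induction l generalizing acc with
  | nil => simp
  | cons x xs ih =>
    simp only [List.foldl_cons, List.countP_cons, ih]
    by_cases hx : x = 0
    · simp [hx]
    · by_cases hm : x % 2 = 0 <;> (simp [hx, hm]; try ring)

-- on digit lists, that count is the histogram sum over the nonzero even digit keys
theorem pv_count_histogram (l : List Int) (hb : ∀ i ∈ l, 0 ≤ i ∧ i ≤ 9) :
    (l.countP (fun i => !(i == 0) && (i % 2 == 0)) : Int)
      = (l.count 2 : Int) + l.count 4 + l.count 6 + l.count 8 := by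
  induction l with
  | nil => simp
  | cons x xs ih =>
    have hx := hb x (List.mem_cons_self)
    have ih' := ih (fun i hi => hb i (List.mem_cons_of_mem _ hi))
    simp only [List.countP_cons, List.count_cons]
    obtain ⟨h0, h9⟩ := hx
    interval_cases x <;> push_cast <;> simp <;> omega

-- ===== VERDICT (by name: the statement is the Claim_ definition above) =====
theorem get_odd_count_spec : Claim_equal_get_odd_count := by
  intro count _ hpre
  unfold Spec_get_odd_count get_odd_count get_odd_count_alt
  have hb := pv_digits_bounded count hpre
  rw [pv_foldl_count, pv_count_histogram _ hb]
  simp [PySem.Dict.getD_foldl_insert_add_one, PySem.Dict.getD_empty]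
  ring
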